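-- pv_equiv track=rewrite | github.com/nithumohandas/python-projects | src/leetcode/palindrome.py | is_palindrome
-- ===== SOURCE A (Python) =====
-- s = "Malayalam"
--
-- def is_palindrome(s):
--     # s == s[::-1] one line code
--     short_s = s.lower()
--
--     left = 0
--     right = len(short_s) - 1
--
--     while left < right:
--
--         if short_s[left] != short_s[right]:
--             return False
--
--         left += 1
--         right -= 1
--
--     return True
-- ===== SOURCE B (Python) =====
-- def is_palindrome(s):
--     t = s.lower()
--     return t == t[::-1]
-- ===== Notes on version B (the rewrite author's own statement) =====
-- stated objective: idiomatic
-- what changed: Replaces the explicit two-pointer inward scan with the idiomatic lowercase-then-reverse whole-string comparison (t == t[::-1]).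
import Mathlib
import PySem

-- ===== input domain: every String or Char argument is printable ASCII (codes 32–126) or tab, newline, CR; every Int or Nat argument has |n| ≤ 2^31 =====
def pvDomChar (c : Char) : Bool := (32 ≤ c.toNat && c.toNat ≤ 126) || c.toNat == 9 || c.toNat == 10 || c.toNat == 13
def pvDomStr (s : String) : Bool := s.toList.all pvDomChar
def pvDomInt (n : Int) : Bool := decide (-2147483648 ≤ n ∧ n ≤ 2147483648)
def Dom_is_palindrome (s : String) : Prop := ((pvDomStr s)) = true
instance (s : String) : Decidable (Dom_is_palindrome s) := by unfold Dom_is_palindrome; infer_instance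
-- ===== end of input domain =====

-- B replaces A's explicit two-pointer inward scan with the idiomatic lowercase-then-reverse
-- whole-string comparison; return values are proved equal on all strings.

-- ===== PORT A =====
-- the while loop: left/right walk inward, early-return False on a mismatch
def pal_loop (t : List Char) (left right : Int) : Bool :=
  if left < right then
    if PySem.List.pyGetD t left ' ' ≠ PySem.List.pyGetD t right ' ' then false
    else pal_loop t (left + 1) (right - 1)
  else true
termination_by (right - left).toNat
decreasing_by omega

def is_palindrome (s : String) : Bool :=
  let short_s := PySem.Chars.lower s.toList
  pal_loop short_s 0 ((short_s.length : Int) - 1)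

-- ===== PORT B =====
-- Source B: t = s.lower(); return t == t[::-1]   (t[::-1] is reverse, PySem.List.slice?_none_none_neg_one)
def is_palindrome_alt (s : String) : Bool :=
  let t := PySem.Chars.lower s.toList
  t == t.reverse

-- ===== PRECONDITION & SPEC =====
def Spec_is_palindrome (s : String) (out : Bool) : Prop := out = is_palindrome_alt s
instance (s : String) (out : Bool) : Decidable (Spec_is_palindrome s out) := by unfold Spec_is_palindrome; infer_instance

-- ===== CLAIM (what is proved, stated in full; the proofs are below) =====
def Claim_equal_is_palindrome : Prop := ∀ (s : String), Dom_is_palindrome s → Spec_is_palindrome s (is_palindrome s)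

-- ===== LEMMAS AND PROOFS =====

-- index-congruence helper: equal indices give equal elements
theorem getElem_idx_congr (t : List Char) (i j : Nat) (hi : i < t.length) (hj : j < t.length)
    (h : i = j) : t[i] = t[j] := by subst h; rfl

-- characterisation of the two-pointer loop: it accepts iff every index pair
-- (i, j) with i < j mirrored around (l + r) / 2 inside [l, r] carries equal characters
theorem pal_loop_iff (t : List Char) (l r : Int) :
    0 ≤ l → r < (t.length : Int) →
    (pal_loop t l r = true ↔
      ∀ (i j : Nat) (hi : i < t.length) (hj : j < t.length),
        l ≤ (i : Int) → (j : Int) ≤ r → i < j → (i : Int) + (j : Int) = l + r → t[i] = t[j]) := by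
  induction l, r using pal_loop.induct t with
  | case1 l r hlr hne =>
    intro hl hr
    -- mismatch: loop returns false, and the pair (l, r) refutes the RHS
    rw [pal_loop, if_pos hlr, if_pos hne]
    constructor
    · intro h; exact absurd h (by simp)
    · intro h
      exfalso
      apply hne
      have hlt : l.toNat < t.length := by omega
      have hrt : r.toNat < t.length := by omega
      have := h l.toNat r.toNat hlt hrt (by omega) (by omega) (by omega) (by omega)
      rw [PySem.List.pyGetD_eq_getElem t ' ' hl (by omega),
          PySem.List.pyGetD_eq_getElem t ' ' (by omega) hr]
      exact this
  | case2 l r hlr hnne ih =>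
    intro hl hr
    have heq : PySem.List.pyGetD t l ' ' = PySem.List.pyGetD t r ' ' := of_not_not hnne
    rw [pal_loop, if_pos hlr, if_neg hnne]
    rw [ih (by omega) (by omega)]
    have hlc : t[l.toNat] = t[r.toNat] := by
      rw [← PySem.List.pyGetD_eq_getElem t ' ' hl (by omega),
          ← PySem.List.pyGetD_eq_getElem t ' ' (show (0:Int) ≤ r by omega) hr]
      exact heq
    constructor
    · intro h i j hi hj hli hjr hij hsum
      by_cases hil : (i : Int) = l
      · have hi' : i = l.toNat := by omega
        have hj' : j = r.toNat := by omega
        subst hi'; subst hj'; exact hlc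
      · have hjl : (j : Int) ≠ r := by omega
        exact h i j hi hj (by omega) (by omega) hij (by omega)
    · intro h i j hi hj hli hjr hij hsum
      exact h i j hi hj (by omega) (by omega) hij (by omega)
  | case3 l r hlr =>
    intro hl hr
    rw [pal_loop, if_neg hlr]
    constructor
    · intro _ i j hi hj hli hjr hij hsum; omega
    · intro _; rfl

theorem pal_loop_eq_reverse (t : List Char) :
    pal_loop t 0 ((t.length : Int) - 1) = (t == t.reverse) := by
  by_cases h0 : t = []
  · subst h0; rw [pal_loop]; simp
  · have hlen : 0 < t.length := List.length_pos_iff.mpr h0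
    rw [Bool.eq_iff_iff, pal_loop_iff t 0 ((t.length : Int) - 1) le_rfl (by omega), beq_iff_eq]
    constructor
    · intro h
      apply List.ext_getElem (by simp)
      intro i hi hi'
      simp only [List.getElem_reverse]
      have hjlt : t.length - 1 - i < t.length := by omega
      rcases lt_trichotomy i (t.length - 1 - i) with hij | hij | hij
      · exact h i (t.length - 1 - i) hi hjlt (by omega) (by omega) hij (by omega)
      · exact getElem_idx_congr t i (t.length - 1 - i) hi hjlt hij
      · exact (h (t.length - 1 - i) i hjlt hi (by omega) (by omega) hij (by omega)).symm
    · intro h i j hi hj hli hjr hij hsum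
      have hq := congrArg (fun l : List Char => l[j]?) h
      simp only [List.getElem?_eq_getElem hj,
        List.getElem?_eq_getElem (show j < t.reverse.length by simpa using hj),
        List.getElem_reverse, Option.some.injEq] at hq
      calc t[i] = t[t.length - 1 - j] := getElem_idx_congr t i (t.length - 1 - j) hi (by omega) (by omega)
        _ = t[j] := hq.symm

-- ===== VERDICT (by name: the statement is the Claim_ definition above) =====
theorem is_palindrome_spec : Claim_equal_is_palindrome := by
  intro s _
  unfold Spec_is_palindrome is_palindrome is_palindrome_alt
  exact pal_loop_eq_reverse _
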